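-- pv_equiv track=rewrite | github.com/lhyphendixon/sidekick-forge | docker/agent/fishaudio_timing.py | _try_emit
-- ===== SOURCE A (Python) =====
-- _SENTENCE_ENDERS = ".!?\n"
--
-- def _try_emit(buf: str, min_chars: int) -> tuple[str | None, str]:
--     """Decide whether to release a prefix of ``buf`` as a TTS chunk.
--
--     Returns ``(emit, remaining)``. ``emit`` is ``None`` when nothing is
--     ready to be pushed yet — the caller should wait for more input or a
--     flush timeout before trying again.
--
--     Boundaries, in priority order:
--       1. Sentence-ending punctuation (``.!?\\n``) — emit through the end
--          of that character so Fish Audio sees a complete sentence.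
--       2. Word boundary (last space) once the buffer reaches
--          ``min_chars`` — emit up to and including that space.
--     """
--     if not buf:
--         return None, buf
--     for i, ch in enumerate(buf):
--         if ch in _SENTENCE_ENDERS:
--             return buf[: i + 1], buf[i + 1 :]
--     if len(buf) >= min_chars:
--         sp = buf.rfind(" ")
--         if sp > 0:
--             return buf[: sp + 1], buf[sp + 1 :]
--     return None, buf
-- ===== SOURCE B (Python) =====
-- _SENTENCE_ENDERS = ".!?\n"
--
-- def _scan(buf):
--     """One pass over buf: (index of first sentence ender or None, index of last space or -1)."""
--     ender = None
--     space = -1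
--     for i, ch in enumerate(buf):
--         if ender is None and ch in _SENTENCE_ENDERS:
--             ender = i
--         if ch == " ":
--             space = i
--     return ender, space
--
-- def _boundary(buf, min_chars):
--     ender, space = _scan(buf)
--     if ender is not None:
--         return ender + 1
--     if len(buf) >= min_chars and space > 0:
--         return space + 1
--     return None
--
-- def _try_emit(buf: str, min_chars: int):
--     cut = _boundary(buf, min_chars)
--     if cut is None:
--         return None, buf
--     return buf[:cut], buf[cut:]
-- ===== Notes on version B (the rewrite author's own statement) =====
-- stated objective: alternative
-- what changed: A's staged early-return ender scan followed by a separate rfind(' ') fallback pass is replaced by one fold over enumerate(buf) that accumulates (first ender index, last space index) simultaneously, a helper that turns that pair into an optional cut index, and a single shared slicing step.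
import Mathlib
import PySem

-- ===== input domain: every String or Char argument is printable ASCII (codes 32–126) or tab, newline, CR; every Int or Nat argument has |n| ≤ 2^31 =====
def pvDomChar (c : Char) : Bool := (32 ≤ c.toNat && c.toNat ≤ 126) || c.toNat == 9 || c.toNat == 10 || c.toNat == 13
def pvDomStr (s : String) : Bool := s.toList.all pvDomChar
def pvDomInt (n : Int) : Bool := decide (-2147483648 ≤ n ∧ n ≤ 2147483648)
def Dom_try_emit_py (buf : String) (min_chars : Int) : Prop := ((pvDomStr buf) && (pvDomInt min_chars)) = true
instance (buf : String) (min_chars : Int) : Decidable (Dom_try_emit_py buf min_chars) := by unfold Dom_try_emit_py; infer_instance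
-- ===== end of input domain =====

-- B replaces A's staged early-return scan + rfind fallback by a single fold over the buffer
-- that tracks (first sentence-ender index, last space index) at once, then one shared cut/slice step (alternative decomposition).


-- ===== PORT A =====
def pvEnders : List Char := ['.', '!', '?', '\n']

-- 'for i, ch in enumerate(buf): if ch in _SENTENCE_ENDERS: return …' — the early-returning scan
def pvScanA : List Char → Nat → Option Nat
  | [], _ => none
  | c :: rest, i => if PySem.Chars.isIn [c] pvEnders then some i else pvScanA rest (i + 1)

def try_emit_py (buf : String) (min_chars : Int) : Option String × String :=
  let l := buf.toList
  if l.isEmpty then (none, buf)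
  else
    match pvScanA l 0 with
    | some i =>
        (some (String.mk (PySem.Chars.slice l none (some ((i : Int) + 1)))),
         String.mk (PySem.Chars.slice l (some ((i : Int) + 1)) none))
    | none =>
        if min_chars ≤ (l.length : Int) then
          let sp := PySem.Chars.rfind l [' ']
          if 0 < sp then
            (some (String.mk (PySem.Chars.slice l none (some (sp + 1)))),
             String.mk (PySem.Chars.slice l (some (sp + 1)) none))
          else (none, buf)
        else (none, buf)

-- ===== PORT B =====
-- the loop body of Source B's _scan: state = (ender, space)
def pvStep (s : Option Int × Int) (p : Int × Char) : Option Int × Int :=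
  ((if s.1.isNone && decide (p.2 ∈ pvEnders) then some p.1 else s.1),
   (if p.2 = ' ' then p.1 else s.2))

-- Source B's _scan: one fold over enumerate(buf)
def pvScanB (buf : List Char) : Option Int × Int :=
  (PySem.List.enumerate buf).foldl pvStep (none, -1)

-- Source B's _boundary
def pvBoundary (buf : List Char) (min_chars : Int) : Option Int :=
  let st := pvScanB buf
  match st.1 with
  | some e => some (e + 1)
  | none =>
      if min_chars ≤ (buf.length : Int) && decide (0 < st.2) then some (st.2 + 1) else none

def try_emit_py_alt (buf : String) (min_chars : Int) : Option String × String :=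
  match pvBoundary buf.toList min_chars with
  | none => (none, buf)
  | some cut =>
      (some (String.mk (PySem.Chars.slice buf.toList none (some cut))),
       String.mk (PySem.Chars.slice buf.toList (some cut) none))

-- ===== PRECONDITION & SPEC =====
def Spec_try_emit_py (buf : String) (min_chars : Int) (out : Option String × String) : Prop := out = try_emit_py_alt buf min_chars
instance (buf : String) (min_chars : Int) (out : Option String × String) : Decidable (Spec_try_emit_py buf min_chars out) := by unfold Spec_try_emit_py; infer_instance

-- ===== CLAIM (what is proved, stated in full; the proofs are below) =====
def Claim_equal_try_emit_py : Prop := ∀ (buf : String) (min_chars : Int), Dom_try_emit_py buf min_chars → Spec_try_emit_py buf min_chars (try_emit_py buf min_chars)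

-- ===== LEMMAS AND PROOFS =====

theorem prefix_single (c : Char) (t : List Char) : [c].isPrefixOf t = (t.head? == some c) := by
  cases t with
  | nil => simp [List.isPrefixOf]
  | cons y ys => simp [List.isPrefixOf, eq_comm]

theorem rfind_go_zero (s : List Char) (c : Char) :
    PySem.Chars.rfind.go s [c] 0 = if s[0]? = some c then 0 else -1 := by
  rw [PySem.Chars.rfind.go, prefix_single]
  simp [List.head?_eq_getElem?]

theorem rfind_go_succ (s : List Char) (c : Char) (k : Nat) :
    PySem.Chars.rfind.go s [c] (k + 1) =
      if s[k + 1]? = some c then ((k + 1 : Nat) : Int) else PySem.Chars.rfind.go s [c] k := by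
  rw [PySem.Chars.rfind.go, prefix_single]
  simp [List.head?_drop]

theorem rfind_go_append (s : List Char) (x c : Char) :
    ∀ k, k < s.length → PySem.Chars.rfind.go (s ++ [x]) [c] k = PySem.Chars.rfind.go s [c] k := by
  intro k
  induction k with
  | zero =>
      intro hk
      rw [rfind_go_zero, rfind_go_zero, List.getElem?_append_left hk]
  | succ k ih =>
      intro hk
      rw [rfind_go_succ, rfind_go_succ, List.getElem?_append_left hk, ih (by omega)]

-- the snoc characterisation of Python's rfind for a single character
theorem rfind_snoc (s : List Char) (x c : Char) :
    PySem.Chars.rfind (s ++ [x]) [c] =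
      if x = c then (s.length : Int) else PySem.Chars.rfind s [c] := by
  cases s with
  | nil =>
      simp only [List.nil_append]
      rw [PySem.Chars.rfind, PySem.Chars.rfind]
      simp only [List.length_singleton, List.length_nil]
      rw [show (1 : Nat) = 0 + 1 from rfl, rfind_go_succ, rfind_go_zero, rfind_go_zero]
      by_cases hc : x = c <;> simp [hc]
  | cons y t =>
      rw [PySem.Chars.rfind, PySem.Chars.rfind]
      have hlen : ((y :: t) ++ [x]).length = t.length + 1 + 1 := by simp
      rw [hlen, rfind_go_succ]
      have h1 : ((y :: t) ++ [x])[t.length + 1 + 1]? = none := List.getElem?_eq_none (by simp)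
      rw [if_neg (by simp [h1]), rfind_go_succ]
      have hx : ((y :: t) ++ [x])[t.length + 1]? = some x := by
        have h := List.getElem?_concat_length (l := y :: t) (a := x)
        simpa using h
      have hn : (y :: t).length = t.length + 1 := by simp
      by_cases hc : x = c
      · subst hc
        rw [if_pos hx, if_pos rfl, hn]
      · have hcond : ¬ (((y :: t) ++ [x])[t.length + 1]? = some c) := by
          rw [hx]; simp [hc]
        rw [if_neg hcond, if_neg hc, hn, rfind_go_succ]
        have h2 : (y :: t)[t.length + 1]? = none := List.getElem?_eq_none (by simp)
        rw [if_neg (by simp [h2])]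
        exact rfind_go_append (y :: t) x c t.length (by simp)

-- one snoc step of Source B's fold
theorem scanB_snoc (l : List Char) (x : Char) :
    pvScanB (l ++ [x]) = pvStep (pvScanB l) ((l.length : Int), x) := by
  rw [pvScanB, pvScanB, PySem.List.enumerate_append, List.foldl_append]
  simp [PySem.List.enumerate_cons, PySem.List.enumerate_nil]

theorem mem_iff_isIn (c : Char) (s : List Char) : PySem.Chars.isIn [c] s = true ↔ c ∈ s := by
  rw [PySem.Chars.isIn_iff_infix]
  constructor
  · intro h; exact h.subset (by simp)
  · intro h
    obtain ⟨pre, suf, rfl⟩ := List.mem_iff_append.mp h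
    exact ⟨pre, suf, by simp⟩

-- one snoc step of A's early-return scan
theorem scanA_snoc (l : List Char) (x : Char) (j : Nat) :
    pvScanA (l ++ [x]) j =
      match pvScanA l j with
      | some i => some i
      | none => if PySem.Chars.isIn [x] pvEnders then some (j + l.length) else none := by
  induction l generalizing j with
  | nil => simp [pvScanA]
  | cons y t ih =>
      rw [List.cons_append, pvScanA, pvScanA]
      by_cases h : PySem.Chars.isIn [y] pvEnders
      · simp [h]
      · simp only [h, if_false, ih (j + 1)]
        cases pvScanA t (j + 1) with
        | some i => simp
        | none =>
            by_cases hx : PySem.Chars.isIn [x] pvEnders <;> simp [hx] <;> omega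

-- the two components of Source B's single pass equal A's two staged passes
theorem scanB_fst (l : List Char) :
    (pvScanB l).1 = (pvScanA l 0).map (fun n => (n : Int)) := by
  induction l using List.reverseRecOn with
  | nil => rfl
  | append_singleton t x ih =>
      rw [scanB_snoc, scanA_snoc, pvStep]
      rcases h : pvScanA t 0 with _ | i
      · rw [h] at ih
        simp only [ih]
        by_cases hx : x ∈ pvEnders
        · have : PySem.Chars.isIn [x] pvEnders = true := (mem_iff_isIn x pvEnders).mpr hx
          simp [this, hx]
        · have : PySem.Chars.isIn [x] pvEnders = false := by
            rcases hh : PySem.Chars.isIn [x] pvEnders with _ | _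
            · rfl
            · exact absurd ((mem_iff_isIn x pvEnders).mp hh) hx
          simp [this, hx]
      · rw [h] at ih
        simp [ih]

theorem scanB_snd (l : List Char) : (pvScanB l).2 = PySem.Chars.rfind l [' '] := by
  induction l using List.reverseRecOn with
  | nil => rfl
  | append_singleton t x ih =>
      rw [scanB_snoc, rfind_snoc, pvStep]
      by_cases hx : x = ' ' <;> simp [hx, ih]

theorem try_emit_py_spec : Claim_equal_try_emit_py := by
  intro buf min_chars _
  show try_emit_py buf min_chars = try_emit_py_alt buf min_chars
  rw [try_emit_py, try_emit_py_alt, pvBoundary]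
  by_cases he : buf.toList.isEmpty
  · have hnil : buf.toList = [] := List.isEmpty_iff.mp he
    rw [hnil]
    have : (pvScanB []).1 = none := rfl
    simp [this, pvScanB, PySem.List.enumerate_nil]
  · simp only [he, if_false]
    rcases h : pvScanA buf.toList 0 with _ | i
    · have h1 : (pvScanB buf.toList).1 = none := by rw [scanB_fst, h]; rfl
      rw [h1]
      simp only [scanB_snd]
      by_cases hm : min_chars ≤ (buf.length : Int)
      · by_cases hs : 0 < PySem.Chars.rfind buf.toList [' ']
        · simp [hm, hs, String.length_toList]
        · simp [hm, hs, String.length_toList]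
      · simp [hm, String.length_toList]
    · have h1 : (pvScanB buf.toList).1 = some (i : Int) := by rw [scanB_fst, h]; rfl
      rw [h1]
      simp
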